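-- pv_equiv track=rewrite | github.com/phantomnat/advent-of-code | 2021/3.py | get_oxygen_rate
-- ===== SOURCE A (Python) =====
-- from functools import reduce
--
-- def get_oxygen_rate(data: list, idx: int):
--     if idx >= len(data[0]):
--         return data[0]
--     elif len(data) == 1:
--         return data[0]
--
--     one_bit_counts = reduce(lambda x, y: [x[i]+y[i] for i in range(len(x))], data)
--
--     one_bit = one_bit_counts[idx]
--     zero_bit = len(data)-one_bit_counts[idx]
--
--     expect = 1
--     if one_bit < zero_bit:
--         expect = 0
--
--     return get_oxygen_rate(list(filter(lambda x: x[idx] == expect, data)), idx+1)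
-- ===== SOURCE B (Python) =====
-- def get_oxygen_rate(data: list, idx: int):
--     while idx < len(data[0]) and len(data) > 1:
--         ones = [x for x in data if x[idx] == 1]
--         zeros = [x for x in data if x[idx] != 1]
--         data = ones if len(zeros) <= len(ones) else zeros
--         idx += 1
--     return data[0]
-- ===== Notes on version B (the rewrite author's own statement) =====
-- stated objective: simpler
-- what changed: Replaces A's tail recursion that bit-counts via reduce over pointwise list additions and then filters by a computed expected bit with an iterative loop that partitions the rows into a ones-group and a zeros-group at the current index and keeps the larger group (tie -> ones), with no bit counting at all.
-- outside the precondition, e.g. on get_oxygen_rate([[1], [8], [0], [-1]], -1): A returns [1], B returns [8]; on get_oxygen_rate([[1], [2]], 0): A returns [1], B returns [1]; on get_oxygen_rate([[1], [1, 1]], 0): A returns [1], B returns [1]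
import Mathlib
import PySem

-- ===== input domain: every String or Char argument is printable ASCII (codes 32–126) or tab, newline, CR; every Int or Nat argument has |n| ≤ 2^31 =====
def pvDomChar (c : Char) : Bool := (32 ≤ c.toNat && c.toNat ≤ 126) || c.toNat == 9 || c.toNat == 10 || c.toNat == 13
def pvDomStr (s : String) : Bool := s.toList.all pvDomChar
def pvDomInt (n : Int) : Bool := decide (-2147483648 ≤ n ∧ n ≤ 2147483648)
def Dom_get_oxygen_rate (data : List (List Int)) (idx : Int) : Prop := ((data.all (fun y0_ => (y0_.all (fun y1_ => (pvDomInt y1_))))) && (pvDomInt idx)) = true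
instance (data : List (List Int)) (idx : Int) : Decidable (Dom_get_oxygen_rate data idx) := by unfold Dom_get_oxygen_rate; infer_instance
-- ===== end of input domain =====

-- B replaces A's count-then-filter recursion (reduce builds a per-column count vector, the
-- idx entry decides an expected bit, then the rows are filtered by it) with an iterative
-- partition: split the rows into the ones-group and zeros-group at idx and keep the larger
-- group (tie -> ones), no bit counting at all; objective: simpler.

-- ===== PORT A =====
-- x[i] for an int index i, totalised with default 0: exact wherever Python does not raise
-- IndexError; the raising inputs are excluded by Pre_get_oxygen_rate below.
def pvGetD (x : List Int) (i : Int) : Int := PySem.List.pyGetD x i 0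

-- fuel is a totality artifact only: one unit per recursive call of A (idx grows by 1 each
-- call and A stops at idx ≥ len(data[0])); the wrapper supplies enough for every input
-- admitted by Pre_get_oxygen_rate.
def goA : Nat → List (List Int) → Int → List Int
  | 0, _, _ => []
  | fuel + 1, data, idx =>
    match data with
    | [] => []          -- Python: data[0] raises IndexError (outside Pre_)
    | d0 :: rest =>
      if ((d0.length : Int)) ≤ idx then d0
      else if rest = [] then d0       -- len(data) == 1
      else
        -- one_bit_counts = reduce(lambda x, y: [x[i]+y[i] for i in range(len(x))], data)
        -- x[i] has i < len x by construction (x.getD i 0 is exact); y[i] via pvGetD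
        let counts := rest.foldl
          (fun x y => (List.range x.length).map (fun i => x.getD i 0 + pvGetD y (i : Int))) d0
        let one_bit := pvGetD counts idx
        let zero_bit := ((d0 :: rest).length : Int) - one_bit
        let expect : Int := if one_bit < zero_bit then 0 else 1
        goA fuel ((d0 :: rest).filter (fun x => pvGetD x idx == expect)) (idx + 1)

def get_oxygen_rate (data : List (List Int)) (idx : Int) : List Int :=
  goA ((((data.headD []).length : Int) - idx).toNat + 1) data idx

-- ===== PORT B =====
-- while idx < len(data[0]) and len(data) > 1: partition into ones/zeros, keep the larger
-- group (tie -> ones); same fuel bound, same totalised indexing as port A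
def goB : Nat → List (List Int) → Int → List Int
  | 0, _, _ => []
  | fuel + 1, data, idx =>
    match data with
    | [] => []          -- Python: len(data[0]) raises IndexError (outside Pre_)
    | d0 :: rest =>
      if idx < ((d0.length : Int)) ∧ 1 < (d0 :: rest).length then
        let ones := (d0 :: rest).filter (fun x => pvGetD x idx == 1)
        let zeros := (d0 :: rest).filter (fun x => !(pvGetD x idx == 1))
        goB fuel (if zeros.length ≤ ones.length then ones else zeros) (idx + 1)
      else d0

def get_oxygen_rate_alt (data : List (List Int)) (idx : Int) : List Int :=
  goB ((((data.headD []).length : Int) - idx).toNat + 1) data idx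

-- ===== PRECONDITION & SPEC =====
-- Pre_ admits every input that returns through the two guard branches (idx past the first
-- row, or a single row), and otherwise requires equal-length 0/1 rows with idx ≥ -len(row):
-- on other inputs A can raise IndexError (empty data, an emptied filter on non-bit values,
-- a ragged reduce, idx below -len); it thereby also excludes some multi-row non-bit inputs
-- on which A happens to return (see the cited examples), because whether the filter empties
-- depends on the data.
def Pre_get_oxygen_rate (data : List (List Int)) (idx : Int) : Prop :=
  data ≠ [] ∧
  (((data.headD []).length : Int) ≤ idx ∨ data.length = 1 ∨
    ((∀ r ∈ data, r.length = (data.headD []).length ∧ ∀ b ∈ r, b = 0 ∨ b = 1) ∧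
      -((data.headD []).length : Int) ≤ idx))
instance (data : List (List Int)) (idx : Int) : Decidable (Pre_get_oxygen_rate data idx) := by
  unfold Pre_get_oxygen_rate; infer_instance

def pvWitness_get_oxygen_rate : List (List Int) × Int := ([[1, 0], [1, 1], [0, 1]], 0)

def Spec_get_oxygen_rate (data : List (List Int)) (idx : Int) (out : List Int) : Prop := out = get_oxygen_rate_alt data idx
instance (data : List (List Int)) (idx : Int) (out : List Int) : Decidable (Spec_get_oxygen_rate data idx out) := by unfold Spec_get_oxygen_rate; infer_instance

-- ===== CLAIM (what is proved, stated in full; the proofs are below) =====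
def Claim_equal_get_oxygen_rate : Prop := ∀ (data : List (List Int)) (idx : Int), Dom_get_oxygen_rate data idx → Pre_get_oxygen_rate data idx → Spec_get_oxygen_rate data idx (get_oxygen_rate data idx)

-- ===== LEMMAS AND PROOFS =====

-- pyGetD with default 0 as a total getD expression
theorem pvGetD_eq_ite (z : List Int) (i : Int) :
    pvGetD z i = if 0 ≤ i then z.getD i.toNat 0
      else if -(z.length : Int) ≤ i then z.getD (i + z.length).toNat 0 else 0 := by
  by_cases h : 0 ≤ i
  · simp [pvGetD, PySem.List.pyGetD, PySem.List.pyGet?_of_nonneg z h, h, List.getD]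
  · rw [if_neg (by omega)]
    by_cases h2 : -(z.length : Int) ≤ i
    · rw [if_pos h2]
      have hk : i = -(((-i).toNat : Nat) : Int) := by omega
      rw [pvGetD, PySem.List.pyGetD, hk,
        PySem.List.pyGet?_neg_natCast z (-i).toNat (by omega) (by omega)]
      have h3 : (-(((-i).toNat : Nat) : Int) + (z.length : Int)).toNat
          = z.length - (-i).toNat := by omega
      rw [h3, List.getD_eq_getElem?_getD]
    · rw [if_neg h2]
      have : PySem.List.pyGet? z i = none := by
        rw [PySem.List.pyGet?_eq_none_iff]
        intro hc; exact h2 hc.1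
      simp [pvGetD, PySem.List.pyGetD, this]

-- in-range negative-or-positive index reads a member of the list
theorem pvGetD_mem (x : List Int) (i : Int)
    (h1 : -(x.length : Int) ≤ i) (h2 : i < (x.length : Int)) : pvGetD x i ∈ x := by
  rw [pvGetD_eq_ite]
  by_cases h : 0 ≤ i
  · rw [if_pos h, List.getD_eq_getElem x 0 (by omega)]
    exact List.getElem_mem _
  · rw [if_neg h, if_pos h1, List.getD_eq_getElem x 0 (by omega)]
    exact List.getElem_mem _

theorem getD_range_map (f : Nat → Int) (m n : Nat) :
    (((List.range m).map f).getD n 0) = if n < m then f n else 0 := by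
  by_cases h : n < m <;> simp [List.getD, h]

-- the pointwise list addition of A's reduce, read at any (possibly negative) index
theorem pvGetD_add (x y : List Int) (hy : y.length = x.length) (i : Int) :
    pvGetD ((List.range x.length).map (fun j => x.getD j 0 + pvGetD y (j : Int))) i
      = pvGetD x i + pvGetD y i := by
  have hyj : ∀ j : Nat, pvGetD y (j : Int) = y.getD j 0 := by
    intro j
    simp [pvGetD, PySem.List.pyGetD, PySem.List.pyGet?_natCast, List.getD]
  have hlen : ((List.range x.length).map (fun j => x.getD j 0 + pvGetD y (j : Int))).length = x.length := by
    simp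
  have key : ∀ n : Nat, ((List.range x.length).map (fun j => x.getD j 0 + pvGetD y (j : Int))).getD n 0
      = x.getD n 0 + y.getD n 0 := by
    intro n
    rw [getD_range_map (fun j => x.getD j 0 + pvGetD y (j : Int)) x.length n]
    by_cases h : n < x.length
    · rw [if_pos h, hyj n]
    · rw [if_neg h, List.getD_eq_default _ _ (by omega), List.getD_eq_default _ _ (by omega)]
      norm_num
  rw [pvGetD_eq_ite, pvGetD_eq_ite x, pvGetD_eq_ite y, hlen, hy]
  split_ifs with h1 h2
  · exact key _
  · exact key _
  · simp

-- A's reduce, read at index i, is the column sum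
theorem counts_spec (rest : List (List Int)) :
    ∀ (acc : List Int) (L : Nat), acc.length = L → (∀ r ∈ rest, r.length = L) →
    ∀ i : Int,
    pvGetD (rest.foldl
        (fun x y => (List.range x.length).map (fun j => x.getD j 0 + pvGetD y (j : Int))) acc) i
      = pvGetD acc i + (rest.map (fun r => pvGetD r i)).sum := by
  induction rest with
  | nil => intro acc L hacc hrest i; simp
  | cons y ys ih =>
    intro acc L hacc hrest i
    simp only [List.foldl_cons, List.map_cons, List.sum_cons]
    rw [ih ((List.range acc.length).map (fun j => acc.getD j 0 + pvGetD y (j : Int))) L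
        (by simp [hacc]) (fun r hr => hrest r (by simp [hr])) i,
      pvGetD_add acc y (by rw [hacc, hrest y (by simp)]) i]
    ring

-- the column sum of a 0/1 column counts the rows carrying a 1
theorem sum_eq_count (l : List (List Int)) (i : Int)
    (h : ∀ x ∈ l, pvGetD x i = 0 ∨ pvGetD x i = 1) :
    (l.map (fun x => pvGetD x i)).sum = ((l.filter (fun x => pvGetD x i == 1)).length : Int) := by
  induction l with
  | nil => simp
  | cons y ys ih =>
    have hys := ih (fun x hx => h x (by simp [hx]))
    rcases h y (by simp) with h0 | h1
    · simp [h0, hys]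
    · simp [h1, hys]
      omega

-- on a 0/1 column, filtering for 0 is filtering for not-1
theorem filter_zero_eq (l : List (List Int)) (i : Int)
    (h : ∀ x ∈ l, pvGetD x i = 0 ∨ pvGetD x i = 1) :
    l.filter (fun x => pvGetD x i == 0) = l.filter (fun x => !(pvGetD x i == 1)) := by
  apply List.filter_congr
  intro x hx
  rcases h x hx with h | h <;> simp [h]

theorem length_filter_split (l : List (List Int)) (p : List Int → Bool) :
    (l.filter p).length + (l.filter (fun x => !p x)).length = l.length := by
  induction l with
  | nil => rfl
  | cons y ys ih =>
    by_cases h : p y <;> simp [h] <;> omega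

theorem go_eq (fuel : Nat) :
    ∀ (L : Nat) (data : List (List Int)) (idx : Int),
    (∀ r ∈ data, r.length = L ∧ ∀ b ∈ r, b = 0 ∨ b = 1) → -(L : Int) ≤ idx →
    goA fuel data idx = goB fuel data idx := by
  induction fuel with
  | zero => intro L data idx _ _; rfl
  | succ fuel ih =>
    intro L data idx hinv hlo
    match data with
    | [] => rfl
    | d0 :: rest =>
      have hd0 : d0.length = L := (hinv d0 (by simp)).1
      by_cases hidx : ((d0.length : Int)) ≤ idx
      · have hA : goA (fuel + 1) (d0 :: rest) idx = d0 := by simp [goA, hidx]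
        have hB : goB (fuel + 1) (d0 :: rest) idx = d0 := by
          simp only [goB]
          rw [if_neg (by push Not; intro h; omega)]
        rw [hA, hB]
      · rcases eq_or_ne rest [] with hrest | hrest
        · subst hrest
          have hA : goA (fuel + 1) [d0] idx = d0 := by simp [goA, hidx]
          have hB : goB (fuel + 1) [d0] idx = d0 := by
            simp only [goB]
            rw [if_neg (by push Not; intro h; simp)]
          rw [hA, hB]
        · have hcond : idx < ((d0.length : Int)) ∧ 1 < (d0 :: rest).length := by
            refine ⟨by omega, by simp [List.length_pos_iff.mpr hrest]⟩
          have hbits : ∀ x ∈ d0 :: rest, pvGetD x idx = 0 ∨ pvGetD x idx = 1 := by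
            intro x hx
            obtain ⟨hxl, hxb⟩ := hinv x hx
            exact hxb _ (pvGetD_mem x idx (by rw [hxl]; omega) (by rw [hxl]; omega))
          -- the one_bit count A reads off its reduce is the length of B's ones-group
          have hones : pvGetD (rest.foldl
              (fun x y => (List.range x.length).map (fun j => x.getD j 0 + pvGetD y (j : Int))) d0) idx
              = (((d0 :: rest).filter (fun x => pvGetD x idx == 1)).length : Int) := by
            rw [counts_spec rest d0 L hd0 (fun r hr => (hinv r (by simp [hr])).1) idx]
            have := sum_eq_count (d0 :: rest) idx hbits
            simpa using this
          have hsplit := length_filter_split (d0 :: rest) (fun x => pvGetD x idx == 1)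
          -- A's filtered list is exactly the group B keeps
          have hfilter : (d0 :: rest).filter (fun x => pvGetD x idx ==
                (if pvGetD (rest.foldl (fun x y => (List.range x.length).map
                    (fun j => x.getD j 0 + pvGetD y (j : Int))) d0) idx
                  < ((d0 :: rest).length : Int) - pvGetD (rest.foldl
                    (fun x y => (List.range x.length).map
                      (fun j => x.getD j 0 + pvGetD y (j : Int))) d0) idx then (0 : Int) else 1))
              = (if ((d0 :: rest).filter (fun x => !(pvGetD x idx == 1))).length
                    ≤ ((d0 :: rest).filter (fun x => pvGetD x idx == 1)).length
                  then (d0 :: rest).filter (fun x => pvGetD x idx == 1)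
                  else (d0 :: rest).filter (fun x => !(pvGetD x idx == 1))) := by
            rw [hones]
            by_cases hc : ((d0 :: rest).filter (fun x => !(pvGetD x idx == 1))).length
                ≤ ((d0 :: rest).filter (fun x => pvGetD x idx == 1)).length
            · rw [if_pos hc, if_neg (by omega)]
            · rw [if_neg hc, if_pos (by omega), filter_zero_eq _ _ hbits]
          simp only [goA, goB, if_neg hidx, if_pos hcond, if_neg hrest]
          rw [hfilter]
          apply ih L _ (idx + 1) _ (by omega)
          intro r hr
          split at hr <;> exact hinv r (List.mem_of_mem_filter hr)

-- ===== VERDICT (by name: the statement is the Claim_ definition above) =====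
theorem get_oxygen_rate_spec : Claim_equal_get_oxygen_rate := by
  intro data idx _ hpre
  unfold Spec_get_oxygen_rate
  obtain ⟨hne, hcase⟩ := hpre
  match data with
  | [] => exact absurd rfl hne
  | d0 :: rest =>
    rcases hcase with hidx | hone | ⟨hlens, hlo⟩
    · -- idx ≥ len(data[0]): both return the first row at once
      simp only [List.headD_cons] at hidx
      have hA : get_oxygen_rate (d0 :: rest) idx = d0 := by
        simp [get_oxygen_rate, goA, hidx]
      have hB : get_oxygen_rate_alt (d0 :: rest) idx = d0 := by
        simp only [get_oxygen_rate_alt, goB]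
        rw [if_neg (by push Not; intro h; omega)]
      rw [hA, hB]
    · -- a single row: both return it at once
      have : rest = [] := List.length_eq_zero_iff.mp (by simpa using hone)
      subst this
      have hA : get_oxygen_rate [d0] idx = d0 := by
        by_cases h : ((d0.length : Int)) ≤ idx <;> simp [get_oxygen_rate, goA, h]
      have hB : get_oxygen_rate_alt [d0] idx = d0 := by
        simp only [get_oxygen_rate_alt, goB]
        rw [if_neg (by push Not; intro h; simp)]
      rw [hA, hB]
    · -- rows of equal length in {0,1}: the two loops agree step by step
      simp only [List.headD_cons] at hlens hlo
      exact go_eq _ d0.length (d0 :: rest) idx (fun r hr => ⟨(hlens r hr).1, (hlens r hr).2⟩) hlo
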